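-- pv_equiv track=rewrite | github.com/cxygiao/DQC_for_homework | Utils/min_global_gate_num.py | split_into_k_parts
-- ===== SOURCE A (Python) =====
-- def split_into_k_parts(N, k):
--     # 计算每一份的基础大小
--     base_size = N // k
--     remainder = N % k  # 计算余数
--
--     result = []
--     for i in range(k):
--         # 将余数分配到前 remainder 份中
--         size = base_size + (1 if i < remainder else 0)
--         result.append(size)
--
--     return result
-- ===== SOURCE B (Python) =====
-- def split_into_k_parts(N, k):
--     # Greedy: each part is the ceiling of the remaining amount over the parts left.
--     result = []
--     remaining = N
--     parts = k
--     while parts > 0: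
--         size = -(-remaining // parts)
--         result.append(size)
--         remaining -= size
--         parts -= 1
--     return result
-- ===== Notes on version B (the rewrite author's own statement) =====
-- stated objective: alternative
-- what changed: Replaces A's divmod-based scheme (one division, then a loop handing the remainder to the first parts) by a greedy loop with no modulus at all: each part is the ceiling of the remaining amount over the parts still to fill, subtracted from the running remainder.
import Mathlib
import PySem

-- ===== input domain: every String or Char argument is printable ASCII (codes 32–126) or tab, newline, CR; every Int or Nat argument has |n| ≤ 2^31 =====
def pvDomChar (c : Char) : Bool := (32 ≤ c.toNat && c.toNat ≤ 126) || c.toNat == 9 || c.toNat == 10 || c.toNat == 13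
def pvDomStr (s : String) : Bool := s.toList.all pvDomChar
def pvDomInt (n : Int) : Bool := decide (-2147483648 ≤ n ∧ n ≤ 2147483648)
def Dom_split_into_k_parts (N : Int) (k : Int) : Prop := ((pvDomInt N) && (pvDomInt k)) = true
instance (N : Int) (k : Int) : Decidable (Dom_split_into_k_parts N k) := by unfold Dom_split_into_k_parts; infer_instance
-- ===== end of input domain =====

-- B replaces A's divmod + remainder-distribution loop by a greedy loop with no modulus:
-- each part is the ceiling of the remaining amount over the parts left (alternative decomposition, same O(k)).
-- Pre_ excludes k = 0, where Python A raises ZeroDivisionError (B's loop never runs there and returns []).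


-- ===== PORT A =====
def split_into_k_parts (N : Int) (k : Int) : List Int :=
  let base_size := PySem.Int.floordiv N k
  let remainder := PySem.Int.mod N k
  (PySem.List.pyRange 0 k 1).foldl
    (fun result i => result ++ [base_size + (if i < remainder then 1 else 0)]) []

-- ===== PORT B =====
-- the while loop of Source B: recursion on the 'parts' counter, same state (remaining, parts, result)
def pvAltLoop (remaining : Int) (parts : Int) (result : List Int) : List Int :=
  if 0 < parts then
    let size := -(PySem.Int.floordiv (-remaining) parts)
    pvAltLoop (remaining - size) (parts - 1) (result ++ [size])
  else result
termination_by parts.toNat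
decreasing_by omega

def split_into_k_parts_alt (N : Int) (k : Int) : List Int :=
  pvAltLoop N k []

-- ===== PRECONDITION & SPEC =====
-- Pre_ excludes exactly k = 0, where Python's '//' and '%' raise ZeroDivisionError
def Pre_split_into_k_parts (N : Int) (k : Int) : Prop := k ≠ 0
instance (N : Int) (k : Int) : Decidable (Pre_split_into_k_parts N k) := by
  unfold Pre_split_into_k_parts; infer_instance
def pvWitness_split_into_k_parts : Int × Int := (7, 3)

def Spec_split_into_k_parts (N : Int) (k : Int) (out : List Int) : Prop := out = split_into_k_parts_alt N k
instance (N : Int) (k : Int) (out : List Int) : Decidable (Spec_split_into_k_parts N k out) := by unfold Spec_split_into_k_parts; infer_instance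

-- ===== CLAIM (what is proved, stated in full; the proofs are below) =====
def Claim_equal_split_into_k_parts : Prop := ∀ (N : Int) (k : Int), Dom_split_into_k_parts N k → Pre_split_into_k_parts N k → Spec_split_into_k_parts N k (split_into_k_parts N k)

-- ===== LEMMAS AND PROOFS =====

-- the common normal form both programs produce for k > 0:
-- r parts of size b+1 followed by k-r parts of size b, with b = N//k, r = N%k
def pvBlocks (N k : Int) : List Int :=
  List.replicate (PySem.Int.mod N k).toNat (PySem.Int.floordiv N k + 1)
    ++ List.replicate (k - PySem.Int.mod N k).toNat (PySem.Int.floordiv N k)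

-- A's mapped loop body over range n is the two replicate blocks (Nat-level core fact)
theorem pv_map_range_blocks (base : Int) (rn : Nat) :
    ∀ n : Nat,
      (List.range n).map (fun j : Nat => base + (if (j : Int) < (rn : Int) then 1 else 0))
        = List.replicate (min rn n) (base + 1) ++ List.replicate (n - rn) base := by
  intro n
  induction n with
  | zero => simp
  | succ n ih =>
    rw [List.range_succ, List.map_append, ih]
    by_cases h : n < rn
    · have h1 : (n : Int) < (rn : Int) := by exact_mod_cast h
      have h2 : min rn n = n := by omega
      have h3 : min rn (n + 1) = n + 1 := by omega
      have h4 : n - rn = 0 := by omega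
      have h5 : n + 1 - rn = 0 := by omega
      simp [h2, h3, h4, h5, List.replicate_succ' (n := n)]
      omega
    · have h1 : ¬ ((n : Int) < (rn : Int)) := by exact_mod_cast h
      have h2 : min rn n = rn := by omega
      have h3 : min rn (n + 1) = rn := by omega
      have h4 : n + 1 - rn = (n - rn) + 1 := by omega
      simp [h2, h3, h4, List.replicate_succ' (n := n - rn), List.append_assoc]
      omega

theorem pvA_eq_blocks (N k : Int) (hpos : 0 < k) :
    split_into_k_parts N k = pvBlocks N k := by
  show (PySem.List.pyRange 0 k 1).foldl
      (fun result i => result ++ [PySem.Int.floordiv N k + (if i < PySem.Int.mod N k then 1 else 0)]) []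
    = pvBlocks N k
  rw [PySem.List.foldl_append_singleton_eq_map, PySem.List.pyRange_one, List.map_map,
    List.nil_append]
  have hm0 := PySem.Int.mod_nonneg (a := N) hpos
  have hmk := PySem.Int.mod_lt (a := N) hpos
  set r := PySem.Int.mod N k with hr
  have hcast : ∀ j ∈ List.range (k - 0).toNat,
      ((fun i : Int => PySem.Int.floordiv N k + (if i < r then 1 else 0)) ∘ fun j : Nat => 0 + (j : Int)) j
      = (fun j : Nat => PySem.Int.floordiv N k + (if (j : Int) < ((r.toNat : Nat) : Int) then 1 else 0)) j := by
    intro j _; simp [Int.toNat_of_nonneg hm0]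
  rw [List.map_congr_left hcast, pv_map_range_blocks]
  have hmin : min r.toNat (k - 0).toNat = r.toNat := by omega
  have hsub : (k - 0).toNat - r.toNat = (k - r).toNat := by omega
  rw [hmin, hsub]; rfl

-- the greedy loop's first step takes b+1 while remainder parts are pending, b afterwards
theorem pv_ceil_step (N k : Int) (hpos : 0 < k) :
    -(PySem.Int.floordiv (-N) k)
      = PySem.Int.floordiv N k + (if 0 < PySem.Int.mod N k then 1 else 0) := by
  have hdm := PySem.Int.floordiv_mul_add_mod (a := N) (b := k)
  have hm0 := PySem.Int.mod_nonneg (a := N) hpos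
  have hmk := PySem.Int.mod_lt (a := N) hpos
  rw [PySem.Int.neg_floordiv_neg_eq_iff_of_pos (hb := hpos)]
  by_cases h : 0 < PySem.Int.mod N k
  · simp only [h, if_pos]
    constructor <;> nlinarith
  · simp only [h, if_neg, not_false_iff, add_zero]
    constructor <;> nlinarith

-- B's greedy loop produces the blocks normal form, for any accumulator
theorem pvAltLoop_blocks : ∀ n : Nat, ∀ (N k : Int) (res : List Int), 0 < k → k.toNat = n →
    pvAltLoop N k res = res ++ pvBlocks N k := by
  intro n
  induction n with
  | zero => intro N k res hk hkn; omega
  | succ n ih =>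
    intro N k res hk hkn
    rw [pvAltLoop, if_pos hk]
    have hdm := PySem.Int.floordiv_mul_add_mod (a := N) (b := k)
    have hm0 := PySem.Int.mod_nonneg (a := N) hk
    have hmk := PySem.Int.mod_lt (a := N) hk
    set b := PySem.Int.floordiv N k with hb
    set r := PySem.Int.mod N k with hr
    rw [pv_ceil_step N k hk, ← hb, ← hr]
    by_cases hk1 : k = 1
    · -- last part: r = 0, the loop stops after appending b
      have hr0 : r = 0 := by omega
      rw [pvAltLoop]
      have : ¬ (0 : Int) < k - 1 := by omega
      rw [if_neg this]
      have hbN : b = N := by rw [hk1] at hdm; linarith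
      simp [pvBlocks, hr0, hk1, hbN]
    · -- k ≥ 2: one greedy step, then the induction hypothesis on (N - size, k - 1)
      have hk1' : 0 < k - 1 := by omega
      set size := b + (if 0 < r then 1 else 0) with hsize
      set r₂ : Int := r - (if 0 < r then 1 else 0) with hr₂
      have hN' : N - size = b * (k - 1) + r₂ := by
        by_cases h : 0 < r <;> simp only [h, if_pos, if_neg, not_false_iff] at hsize hr₂ <;> nlinarith
      have hb' : PySem.Int.floordiv (N - size) (k - 1) = b := by
        rw [PySem.Int.floordiv_eq_iff_of_pos (hb := hk1'), hN']
        constructor <;> nlinarith [show (0:Int) ≤ r₂ ∧ r₂ < k - 1 by constructor <;> omega]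
      have hr' : PySem.Int.mod (N - size) (k - 1) = r₂ := by
        have h2 := PySem.Int.floordiv_mul_add_mod (a := N - size) (b := k - 1)
        rw [hb'] at h2; linarith [hN']
      rw [ih (N - size) (k - 1) (res ++ [size]) hk1' (by omega)]
      rw [List.append_assoc]
      congr 1
      -- size :: pvBlocks (N - size) (k - 1) = pvBlocks N k
      show [size] ++ pvBlocks (N - size) (k - 1) = pvBlocks N k
      rw [pvBlocks, pvBlocks, hb', hr', ← hb, ← hr]
      by_cases h : 0 < r
      · have e1 : r.toNat = r₂.toNat + 1 := by simp only [h, if_pos] at hr₂; omega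
        have e2 : (k - r).toNat = (k - 1 - r₂).toNat := by simp only [h, if_pos] at hr₂; omega
        have e3 : size = b + 1 := by simp only [h, if_pos] at hsize; omega
        rw [e1, e2, e3, List.replicate_succ]
        simp
      · have e1 : r = 0 := by omega
        have e2 : r₂ = 0 := by simp only [h, if_neg, not_false_iff] at hr₂; omega
        have e3 : size = b := by simp only [h, if_neg, not_false_iff] at hsize; omega
        have e4 : (k - 0).toNat = (k - 1 - 0).toNat + 1 := by omega
        rw [e1, e2, e3, e4, List.replicate_succ]
        simp

theorem split_into_k_parts_eq (N k : Int) (hk : k ≠ 0) :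
    split_into_k_parts N k = split_into_k_parts_alt N k := by
  rcases lt_or_gt_of_ne hk with hneg | hpos
  · -- k < 0: A's range is empty and B's loop never runs
    have hA : split_into_k_parts N k = [] := by
      show (PySem.List.pyRange 0 k 1).foldl _ [] = []
      rw [PySem.List.pyRange_one]
      have h0 : (k - 0).toNat = 0 := by omega
      simp [h0]
      intro a; omega -- h0 closes range length; side goal k ≤ ↑a
    have hB : split_into_k_parts_alt N k = [] := by
      show pvAltLoop N k [] = []
      rw [pvAltLoop, if_neg (by omega)]
    rw [hA, hB]
  · rw [pvA_eq_blocks N k hpos]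
    show pvBlocks N k = pvAltLoop N k []
    rw [pvAltLoop_blocks k.toNat N k [] hpos rfl, List.nil_append]

-- ===== VERDICT (by name: the statements are the Claim_ definitions above) =====
theorem split_into_k_parts_spec : Claim_equal_split_into_k_parts := by
  intro N k _ hk
  exact split_into_k_parts_eq N k hk
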